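-- pv_equiv track=rewrite | github.com/leemnj/bioinfo-algorithm | chapter_06/bioinfo_6c.py | parse_genome_to_edges
-- ===== SOURCE A (Python) =====
-- def parse_genome_to_edges(genome_str):
--     """
--     문자열 형태의 유전체를 파싱하여 각 노드 간의 연결(Edge) 정보를 딕셔너리로 반환합니다.
--     예: (+1 +2 +3) -> {2: 3, 3: 2, 4: 5, 5: 4, 6: 1, 1: 6}
--     """
--     edges = {}
--     chromosomes = genome_str.strip().split('(')
--
--     max_block = 0
--
--     for chrom in chromosomes:
--         if not chrom: continue
--         # 괄호 제거 및 블록 분리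
--         blocks = list(map(int, chrom.replace(')', '').split()))
--
--         n = len(blocks)
--         for i in range(n):
--             curr_block = blocks[i]
--             next_block = blocks[(i + 1) % n] # 원형이므로 마지막은 처음과 연결
--
--             # 절댓값 최대치 갱신 (전체 블록 개수 n을 구하기 위함)
--             max_block = max(max_block, abs(curr_block), abs(next_block))
--
--             # 노드 번호 매핑 (블록 k -> 2k-1, 2k)
--             # +k: Tail은 2k
--             # -k: Tail은 2k-1
--             if curr_block > 0:
--                 curr_tail = 2 * curr_block
--             else:
--                 curr_tail = 2 * abs(curr_block) - 1
--
--             # +k: Head는 2k-1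
--             # -k: Head는 2k
--             if next_block > 0:
--                 next_head = 2 * next_block - 1
--             else:
--                 next_head = 2 * abs(next_block)
--
--             # 양방향 연결 (무방향 그래프)
--             edges[curr_tail] = next_head
--             edges[next_head] = curr_tail
--
--     return edges, max_block
-- ===== SOURCE B (Python) =====
-- def parse_genome_to_edges(genome_str):
--     # Single-pass character-level state machine: no split/replace/index arithmetic.
--     # A trailing sentinel boundary character closes the last chromosome.
--     edges = {}
--     max_block = 0
--     tok = ''
--     first = None
--     prev = None
--     for ch in genome_str.strip() + '(':
--         if ch == '(':
--             if tok:
--                 first, prev, max_block = _emit(edges, int(tok), first, prev, max_block)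
--                 tok = ''
--             if prev is not None:
--                 u = _tail(prev)
--                 v = _head(first)
--                 edges[u] = v
--                 edges[v] = u
--             first = None
--             prev = None
--         elif ch == ')':
--             pass
--         elif ch.isspace():
--             if tok:
--                 first, prev, max_block = _emit(edges, int(tok), first, prev, max_block)
--                 tok = ''
--         else:
--             tok += ch
--     return edges, max_block
--
--
-- def _tail(b):
--     return 2 * b if b > 0 else -2 * b - 1
--
--
-- def _head(b):
--     return 2 * b - 1 if b > 0 else -2 * b
--
--
-- def _emit(edges, b, first, prev, max_block):
--     max_block = max(max_block, abs(b))
--     if prev is not None: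
--         u = _tail(prev)
--         v = _head(b)
--         edges[u] = v
--         edges[v] = u
--     if first is None:
--         first = b
--     return first, b, max_block
-- ===== Notes on version B (the rewrite author's own statement) =====
-- stated objective: alternative
-- what changed: B replaces A's staged string pipeline (strip, split on chromosome starts, delete the closing bracket, whitespace-split, build a per-chromosome block list, then an indexed loop that pairs block i with block (i+1) mod n) by a single-pass character-level state machine with O(1) auxiliary state: it scans the characters once, accumulating the current token and the first/previous block of the open chromosome, emits each adjacency edge as soon as the next block is parsed, and closes the circle at each chromosome boundary via a trailing sentinel boundary character - no intermediate chunk/block lists …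
import Mathlib
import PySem

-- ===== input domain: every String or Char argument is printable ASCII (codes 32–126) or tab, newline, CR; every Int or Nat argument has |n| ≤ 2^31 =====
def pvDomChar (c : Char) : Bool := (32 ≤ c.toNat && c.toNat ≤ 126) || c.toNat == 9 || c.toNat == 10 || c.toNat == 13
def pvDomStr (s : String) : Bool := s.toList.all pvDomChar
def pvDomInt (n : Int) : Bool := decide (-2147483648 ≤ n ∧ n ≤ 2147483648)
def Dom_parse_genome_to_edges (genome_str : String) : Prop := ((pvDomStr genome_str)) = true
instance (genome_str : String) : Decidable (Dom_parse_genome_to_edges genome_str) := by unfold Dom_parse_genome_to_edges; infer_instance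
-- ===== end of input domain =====

-- B replaces A's staged string pipeline (strip/split/replace/split + indexed loop over blocks)
-- by a single-pass character-level state machine that emits each edge as soon as the next
-- block is parsed (objective: alternative). Equality proved on the return value.

-- ===== PORT A =====
-- chromosomes = genome_str.strip().split('(')
def pvChroms (s : String) : List String :=
  (PySem.Str.split? (PySem.Str.strip s) "(").getD []
-- blocks = list(map(int, chrom.replace(')', '').split()))  — int() raises outside Pre_
def pvBlocks (chrom : String) : List Int :=
  (PySem.Str.split₀ (PySem.Str.replace chrom ")" "")).map (fun t => (PySem.Int.ofStr? t).getD 0)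

-- A's two sign-case node computations (the same if-expressions as A's body)
def aTail (b : Int) : Int := if b > 0 then 2 * b else 2 * |b| - 1
def aHead (b : Int) : Int := if b > 0 then 2 * b - 1 else 2 * |b|

-- A's inner loop body over i in range(n), threading (edges, max_block)
def aStep (bs : List Int) (st : PySem.Dict Int Int × Int) (i : Int) :
    PySem.Dict Int Int × Int :=
  let n : Int := bs.length
  let curr := PySem.List.pyGetD bs i 0
  let next := PySem.List.pyGetD bs (PySem.Int.mod (i + 1) n) 0
  let m := max (max st.2 |curr|) |next|
  ((st.1.insert (aTail curr) (aHead next)).insert (aHead next) (aTail curr), m)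

def parse_genome_to_edges (genome_str : String) : (List (Int × Int)) × Int :=
  let res := (pvChroms genome_str).foldl
    (fun st chrom =>
      if chrom = "" then st
      else
        let blocks := pvBlocks chrom
        (PySem.List.pyRange 0 (blocks.length : Int) 1).foldl (aStep blocks) st)
    (PySem.Dict.empty, 0)
  (res.1.items, res.2)

-- ===== PORT B =====
-- Source B helpers _tail / _head
def bTail (b : Int) : Int := if b > 0 then 2 * b else -2 * b - 1
def bHead (b : Int) : Int := if b > 0 then 2 * b - 1 else -2 * b

-- Source B _emit(edges, b, first, prev, max_block): returns the new (edges, first, prev, max_block)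
def pvEmit (edges : PySem.Dict Int Int) (b : Int) (first prev : Option Int) (mx : Int) :
    PySem.Dict Int Int × Option Int × Option Int × Int :=
  let mx' := max mx |b|
  let edges' := match prev with
    | none => edges
    | some p => (edges.insert (bTail p) (bHead b)).insert (bHead b) (bTail p)
  let first' := match first with
    | none => some b
    | some f => some f
  (edges', first', some b, mx')

-- scanner state: (tok, edges, first, prev, max_block); 'if tok: … emit(int(tok)) …; tok = ""'
def bFlush (st : List Char × PySem.Dict Int Int × Option Int × Option Int × Int) :
    List Char × PySem.Dict Int Int × Option Int × Option Int × Int :=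
  match st with
  | (tok, edges, first, prev, mx) =>
    if tok.isEmpty then st
    else ([], pvEmit edges ((PySem.Int.ofChars? tok).getD 0) first prev mx)

-- one character of the state machine (branch order as in Source B)
def bStep (st : List Char × PySem.Dict Int Int × Option Int × Option Int × Int) (c : Char) :
    List Char × PySem.Dict Int Int × Option Int × Option Int × Int :=
  if c = '(' then
    match bFlush st with
    | (_, edges, first, prev, mx) =>
      let edges2 := match prev with
        | none => edges
        | some p =>
            (edges.insert (bTail p) (bHead (first.getD 0))).insert (bHead (first.getD 0)) (bTail p)
      ([], edges2, none, none, mx)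
  else if c = ')' then st
  else if PySem.Chars.isspace c then bFlush st
  else
    match st with
    | (tok, rest) => (tok ++ [c], rest)

-- for ch in genome_str.strip() + '(': …
def parse_genome_to_edges_alt (genome_str : String) : (List (Int × Int)) × Int :=
  match ((PySem.Str.strip genome_str).toList ++ ['(']).foldl bStep
      ([], PySem.Dict.empty, none, none, 0) with
  | (_, edges, _, _, mx) => (edges.items, mx)

-- ===== PRECONDITION & SPEC =====
-- Pre_ excludes exactly the inputs where Python's int() raises ValueError on a token
-- (both A and B raise there); on every other string both return.
def Pre_parse_genome_to_edges (genome_str : String) : Prop :=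
  ∀ chrom ∈ pvChroms genome_str,
    ∀ tok ∈ PySem.Str.split₀ (PySem.Str.replace chrom ")" ""),
      PySem.Int.ofStr? tok ≠ none
instance (genome_str : String) : Decidable (Pre_parse_genome_to_edges genome_str) := by
  unfold Pre_parse_genome_to_edges; infer_instance

def pvWitness_parse_genome_to_edges : String := "(+1 -2 +3)(-4 +5)"

def Spec_parse_genome_to_edges (genome_str : String) (out : (List (Int × Int)) × Int) : Prop := out = parse_genome_to_edges_alt genome_str
instance (genome_str : String) (out : (List (Int × Int)) × Int) : Decidable (Spec_parse_genome_to_edges genome_str out) := by unfold Spec_parse_genome_to_edges; infer_instance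

-- ===== CLAIM (what is proved, stated in full; the proofs are below) =====
def Claim_equal_parse_genome_to_edges : Prop := ∀ (genome_str : String), Dom_parse_genome_to_edges genome_str → Pre_parse_genome_to_edges genome_str → Spec_parse_genome_to_edges genome_str (parse_genome_to_edges genome_str)

-- ===== LEMMAS AND PROOFS =====

-- node-number functions agree
lemma bTail_eq (b : Int) : bTail b = aTail b := by
  unfold bTail aTail; split_ifs with h <;> [rfl; skip]
  have : b ≤ 0 := le_of_not_gt h
  rw [abs_of_nonpos this]; ring

lemma bHead_eq (b : Int) : bHead b = aHead b := by
  unfold bHead aHead; split_ifs with h <;> [rfl; skip]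
  have : b ≤ 0 := le_of_not_gt h
  rw [abs_of_nonpos this]; ring

-- ---------- string-pipeline characterisations ----------

-- structural form of splitOn on the single-char separator '('
def spGo : List Char → List Char × List (List Char)
  | [] => ([], [])
  | c :: t => if c = '(' then ([], (spGo t).1 :: (spGo t).2) else (c :: (spGo t).1, (spGo t).2)

lemma splitOn_go_eq (fuel : Nat) :
    ∀ (l cur : List Char) (acc : List (List Char)), l.length ≤ fuel →
      PySem.Chars.splitOn.go ['('] fuel l cur acc
        = acc.reverse ++ ((cur.reverse ++ (spGo l).1) :: (spGo l).2) := by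
  induction fuel with
  | zero =>
    intro l cur acc h
    have : l = [] := by cases l <;> simp_all
    subst this
    simp [PySem.Chars.splitOn.go, spGo]
  | succ fuel ih =>
    intro l cur acc h
    cases l with
    | nil => simp [PySem.Chars.splitOn.go, spGo]
    | cons c rest =>
      by_cases hc : c = '('
      · subst hc
        have hpre : List.isPrefixOf ['('] ('(' :: rest) = true := by
          simp [List.isPrefixOf]
        rw [PySem.Chars.splitOn.go]
        simp only [hpre, if_pos]
        rw [ih _ _ _ (by simpa using Nat.le_of_succ_le_succ h)]
        simp [spGo]
      · have hpre : List.isPrefixOf ['('] (c :: rest) = false := by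
          simp [List.isPrefixOf]
          exact fun hh => absurd hh.symm hc
        rw [PySem.Chars.splitOn.go]
        simp only [hpre, Bool.false_eq_true, if_false]
        rw [ih rest (c :: cur) acc (by simpa using Nat.le_of_succ_le_succ h)]
        simp [spGo, hc]

lemma chunks_eq (cs : List Char) :
    PySem.Chars.splitOn cs ['('] = (spGo cs).1 :: (spGo cs).2 := by
  unfold PySem.Chars.splitOn
  rw [splitOn_go_eq _ _ _ _ (by omega)]
  simp

lemma spGo_no_paren (cs : List Char) :
    '(' ∉ (spGo cs).1 ∧ ∀ ch ∈ (spGo cs).2, '(' ∉ ch := by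
  induction cs with
  | nil => simp [spGo]
  | cons c t ih =>
    by_cases hc : c = '('
    · subst hc
      simp only [spGo, if_true]
      exact ⟨by simp, by
        intro ch hch
        rcases List.mem_cons.mp hch with rfl | hm
        · exact ih.1
        · exact ih.2 ch hm⟩
    · simp only [spGo, if_neg hc]
      exact ⟨by
        intro hm
        rcases List.mem_cons.mp hm with rfl | hm
        · exact hc rfl
        · exact ih.1 hm, ih.2⟩

lemma spGo_join (cs : List Char) :
    ((spGo cs).1 :: (spGo cs).2).flatMap (· ++ ['(']) = cs ++ ['('] := by
  induction cs with
  | nil => simp [spGo]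
  | cons c t ih =>
    by_cases hc : c = '('
    · subst hc
      simp only [spGo, if_true, List.flatMap_cons]
      simpa using ih
    · simp only [spGo, if_neg hc, List.flatMap_cons] at *
      simpa using ih

-- replace(')', '') is filtering the character out
lemma replace_go_filter (fuel : Nat) :
    ∀ (l acc : List Char), l.length ≤ fuel →
      PySem.Chars.replace.go [')'] [] fuel l acc
        = acc.reverse ++ l.filter (fun c => c ≠ ')') := by
  induction fuel with
  | zero =>
    intro l acc h
    have : l = [] := by cases l <;> simp_all
    subst this
    simp [PySem.Chars.replace.go]
  | succ fuel ih =>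
    intro l acc h
    cases l with
    | nil => simp [PySem.Chars.replace.go]
    | cons c rest =>
      by_cases hc : c = ')'
      · subst hc
        have hpre : List.isPrefixOf [')'] (')' :: rest) = true := by simp [List.isPrefixOf]
        rw [PySem.Chars.replace.go]
        simp only [hpre, if_pos]
        rw [ih _ _ (by simpa using Nat.le_of_succ_le_succ h)]
        simp
      · have hpre : List.isPrefixOf [')'] (c :: rest) = false := by
          simp [List.isPrefixOf]
          exact fun hh => absurd hh.symm hc
        rw [PySem.Chars.replace.go]
        simp only [hpre, Bool.false_eq_true, if_false]
        rw [ih rest (c :: acc) (by simpa using Nat.le_of_succ_le_succ h)]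
        simp [hc]

lemma replace_filter (cs : List Char) :
    PySem.Chars.replace cs [')'] [] = cs.filter (fun c => c ≠ ')') := by
  unfold PySem.Chars.replace
  rw [if_neg (by simp)]
  rw [replace_go_filter _ _ _ (le_refl _)]
  rfl

-- split₀.go accumulator lemma
lemma go_nil (cur : List Char) (acc : List (List Char)) :
    PySem.Chars.split₀.go [] cur acc
      = if cur.isEmpty then acc.reverse else (cur.reverse :: acc).reverse := by
  simp only [PySem.Chars.split₀.go]

lemma split₀_go_acc (s : List Char) :
    ∀ (cur : List Char) (acc : List (List Char)),
      PySem.Chars.split₀.go s cur acc = acc.reverse ++ PySem.Chars.split₀.go s cur [] := by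
  induction s with
  | nil =>
    intro cur acc
    by_cases hc : cur.isEmpty <;> simp [PySem.Chars.split₀.go, hc]
  | cons c rest ih =>
    intro cur acc
    by_cases hs : PySem.Chars.isspace c
    · by_cases hc : cur.isEmpty
      · rw [PySem.Chars.split₀.go, PySem.Chars.split₀.go]
        simp only [hs, hc, if_true]
        exact ih [] acc
      · rw [PySem.Chars.split₀.go, PySem.Chars.split₀.go]
        simp only [hs, hc, if_true, Bool.false_eq_true, if_false]
        rw [ih [] (cur.reverse :: acc), ih [] [cur.reverse]]
        simp
    · rw [PySem.Chars.split₀.go, PySem.Chars.split₀.go]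
      simp only [hs, Bool.false_eq_true, if_false]
      exact ih (c :: cur) acc

-- ---------- token-level view of the scanner ----------

-- per-token emission (= Source B's tok-flush applied to a complete token)
def emitTok (core : PySem.Dict Int Int × Option Int × Option Int × Int) (t : List Char) :
    PySem.Dict Int Int × Option Int × Option Int × Int :=
  pvEmit core.1 ((PySem.Int.ofChars? t).getD 0) core.2.1 core.2.2.1 core.2.2.2

-- scanning a '('-free chunk and flushing = folding the token emitter over split₀'s tokens
lemma scan_chunk (cs : List Char) (h : '(' ∉ cs) :
    ∀ (cur : List Char) (core : PySem.Dict Int Int × Option Int × Option Int × Int),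
      bFlush (cs.foldl bStep (cur, core))
        = ([], (PySem.Chars.split₀.go (cs.filter (fun c => c ≠ ')')) cur.reverse []).foldl
            emitTok core) := by
  induction cs with
  | nil =>
    intro cur core
    obtain ⟨e, f, p, m⟩ := core
    by_cases hc : cur.isEmpty
    · have hcur : cur = [] := by simpa [List.isEmpty_iff] using hc
      subst hcur
      simp only [List.filter_nil, List.foldl_nil]
      rw [go_nil]
      simp [bFlush]
    · simp only [List.filter_nil, List.foldl_nil]
      rw [go_nil]
      rw [bFlush]
      simp [hc, emitTok]
  | cons c rest ih =>
    intro cur core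
    have hc : c ≠ '(' := fun hh => h (hh ▸ List.mem_cons_self ..)
    have hrest : '(' ∉ rest := fun hh => h (List.mem_cons_of_mem _ hh)
    by_cases hp : c = ')'
    · subst hp
      have hstep : bStep (cur, core) ')' = (cur, core) := by
        rw [bStep]; simp
      simp only [List.foldl_cons, hstep, List.filter_cons]
      simpa using ih hrest cur core
    · by_cases hs : PySem.Chars.isspace c
      · have hstep : bStep (cur, core) c = bFlush (cur, core) := by
          rw [bStep]; simp [hc, hp, hs]
        have hfil : (c :: rest).filter (fun c => c ≠ ')') =
            c :: rest.filter (fun c => c ≠ ')') := by simp [hp]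
        obtain ⟨e, f, p, m⟩ := core
        by_cases hcur : cur.isEmpty
        · have hcur' : cur = [] := by simpa [List.isEmpty_iff] using hcur
          subst hcur'
          have hb : bFlush (([] : List Char), e, f, p, m) = ([], e, f, p, m) := by
            rw [bFlush]; simp
          simp only [List.foldl_cons, hstep, hb, hfil]
          rw [PySem.Chars.split₀.go]
          simp only [hs, if_true, List.isEmpty_nil, List.reverse_nil]
          exact ih hrest [] (e, f, p, m)
        · have hb : bFlush (cur, e, f, p, m)
              = ([], emitTok (e, f, p, m) cur) := by
            rw [bFlush]; simp [hcur, emitTok]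
          simp only [List.foldl_cons, hstep, hb, hfil]
          rw [PySem.Chars.split₀.go]
          have hre : cur.reverse.isEmpty = false := by
            simp [List.isEmpty_iff] at hcur ⊢; simpa using hcur
          simp only [hs, if_true, hre, Bool.false_eq_true, if_false, List.reverse_reverse]
          rw [split₀_go_acc _ [] [cur]]
          rw [ih hrest [] (emitTok (e, f, p, m) cur)]
          simp
      · have hstep : bStep (cur, core) c = (cur ++ [c], core) := by
          rw [bStep]; simp [hc, hp, hs]
        have hfil : (c :: rest).filter (fun c => c ≠ ')') =
            c :: rest.filter (fun c => c ≠ ')') := by simp [hp]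
        simp only [List.foldl_cons, hstep, hfil]
        rw [PySem.Chars.split₀.go]
        simp only [hs, Bool.false_eq_true, if_false]
        have : c :: cur.reverse = (cur ++ [c]).reverse := by simp
        rw [this]
        exact ih hrest (cur ++ [c]) core

-- ---------- block-level view ----------

def insPair (e : PySem.Dict Int Int) (pr : Int × Int) : PySem.Dict Int Int :=
  (e.insert (bTail pr.1) (bHead pr.2)).insert (bHead pr.2) (bTail pr.1)

def pairGo (f : Int) : Int → List Int → List (Int × Int)
  | p, [] => [(p, f)]
  | p, b :: t => (p, b) :: pairGo f b t

def pairSeq : List Int → List (Int × Int)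
  | [] => []
  | b :: t => pairGo b b t

def emitBlock (core : PySem.Dict Int Int × Option Int × Option Int × Int) (b : Int) :
    PySem.Dict Int Int × Option Int × Option Int × Int :=
  pvEmit core.1 b core.2.1 core.2.2.1 core.2.2.2

def closeCore (core : PySem.Dict Int Int × Option Int × Option Int × Int) :
    PySem.Dict Int Int × Int :=
  match core with
  | (e, f, p, m) =>
    (match p with
     | none => e
     | some pp => (e.insert (bTail pp) (bHead (f.getD 0))).insert (bHead (f.getD 0)) (bTail pp),
     m)

lemma pairGo_zip (f : Int) : ∀ (l : List Int) (p : Int),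
    pairGo f p l = (p :: l).zip (l ++ [f]) := by
  intro l
  induction l with
  | nil => intro p; simp [pairGo]
  | cons b t ih => intro p; simp [pairGo, ih b]

lemma pairGo_length (f : Int) (l : List Int) (p : Int) :
    (pairGo f p l).length = l.length + 1 := by
  rw [pairGo_zip]; simp

lemma close_fold (f : Int) : ∀ (l : List Int) (p : Int) (e : PySem.Dict Int Int) (m : Int),
    closeCore (l.foldl emitBlock (e, some f, some p, m))
      = ((pairGo f p l).foldl insPair e, l.foldl (fun a b => max a |b|) m) := by
  intro l
  induction l with
  | nil => intro p e m; rfl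
  | cons b t ih =>
    intro p e m
    have hstep : emitBlock (e, some f, some p, m) b
        = (insPair e (p, b), some f, some b, max m |b|) := rfl
    simp only [List.foldl_cons, hstep, pairGo, ih]

-- A-side components of aStep
def aDict (bs : List Int) (d : PySem.Dict Int Int) (i : Int) : PySem.Dict Int Int :=
  let curr := PySem.List.pyGetD bs i 0
  let next := PySem.List.pyGetD bs (PySem.Int.mod (i + 1) (bs.length : Int)) 0
  (d.insert (aTail curr) (aHead next)).insert (aHead next) (aTail curr)

def aMax (bs : List Int) (m : Int) (i : Int) : Int :=
  max (max m |PySem.List.pyGetD bs i 0|)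
      |PySem.List.pyGetD bs (PySem.Int.mod (i + 1) (bs.length : Int)) 0|

lemma aStep_eq (bs : List Int) (st : PySem.Dict Int Int × Int) (i : Int) :
    aStep bs st i = (aDict bs st.1 i, aMax bs st.2 i) := rfl

-- ≤-characterisations of the two running-max loop shapes
lemma foldl_max_proj_le_iff (f : Int → Int) (L : List Int) (m x : Int) :
    L.foldl (fun a y => max a (f y)) m ≤ x ↔ m ≤ x ∧ ∀ y ∈ L, f y ≤ x := by
  induction L generalizing m with
  | nil => simp
  | cons y L ih =>
    simp only [List.foldl_cons, ih, List.mem_cons]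
    constructor
    · rintro ⟨h1, h2⟩
      exact ⟨le_trans (le_max_left _ _) h1,
        fun z hz => hz.elim (fun e => e ▸ le_trans (le_max_right _ _) h1) (h2 z)⟩
    · rintro ⟨h1, h2⟩
      exact ⟨max_le h1 (h2 y (Or.inl rfl)), fun z hz => h2 z (Or.inr hz)⟩

lemma foldl_max2_le_iff (f g : Int → Int) (L : List Int) (m x : Int) :
    L.foldl (fun a i => max (max a (f i)) (g i)) m ≤ x ↔
      m ≤ x ∧ ∀ i ∈ L, f i ≤ x ∧ g i ≤ x := by
  induction L generalizing m with
  | nil => simp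
  | cons y L ih =>
    simp only [List.foldl_cons, ih, List.mem_cons]
    constructor
    · rintro ⟨h1, h2⟩
      have hm : m ≤ x := le_trans (le_trans (le_max_left _ _) (le_max_left _ _)) h1
      have hf : f y ≤ x := le_trans (le_trans (le_max_right _ _) (le_max_left _ _)) h1
      have hg : g y ≤ x := le_trans (le_max_right _ _) h1
      exact ⟨hm, fun z hz => hz.elim (fun e => e ▸ ⟨hf, hg⟩) (h2 z)⟩
    · rintro ⟨h1, h2⟩
      exact ⟨max_le (max_le h1 (h2 y (Or.inl rfl)).1) (h2 y (Or.inl rfl)).2,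
        fun z hz => h2 z (Or.inr hz)⟩

-- circular-next index: for 0 ≤ i < n the Python '(i+1) % n' is i+1 or 0
lemma next_index (i n : Int) (h0 : 0 ≤ i) (h1 : i < n) :
    PySem.Int.mod (i + 1) n = if i + 1 < n then i + 1 else 0 := by
  have hn : 0 < n := lt_of_le_of_lt h0 h1
  rw [PySem.Int.mod_eq_emod_of_pos hn]
  split_ifs with hlt
  · exact Int.emod_eq_of_lt (by omega) hlt
  · have : i + 1 = n := by omega
    simp [this]

-- the two running-max folds agree
lemma max_fold_eq (bs : List Int) (m : Int) :
    (PySem.List.pyRange 0 (bs.length : Int) 1).foldl (aMax bs) m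
      = bs.foldl (fun a b => max a |b|) m := by
  have hmemA : ∀ i ∈ PySem.List.pyRange 0 (bs.length : Int) 1,
      ∃ k : Nat, i = (k : Int) ∧ k < bs.length := by
    intro i hi
    rw [PySem.List.mem_pyRange_one] at hi
    exact ⟨i.toNat, (Int.toNat_of_nonneg hi.1).symm, by omega⟩
  have habs : ∀ (k : Nat), k < bs.length → bs.getD k 0 ∈ bs := by
    intro k hk
    rw [List.getD_eq_getElem bs 0 hk]
    exact List.getElem_mem hk
  have hA : (PySem.List.pyRange 0 (bs.length : Int) 1).foldl (aMax bs) m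
      = (PySem.List.pyRange 0 (bs.length : Int) 1).foldl
          (fun a i => max (max a (|PySem.List.pyGetD bs i 0|))
            (|PySem.List.pyGetD bs (PySem.Int.mod (i + 1) (bs.length : Int)) 0|)) m := rfl
  rw [hA]
  apply le_antisymm
  · rw [foldl_max2_le_iff]
    refine ⟨(foldl_max_proj_le_iff (fun b => |b|) bs m _).mp le_rfl |>.1, ?_⟩
    intro i hi
    obtain ⟨k, rfl, hk⟩ := hmemA i hi
    have hrhs := (foldl_max_proj_le_iff (fun b => |b|) bs m _).mp le_rfl
    constructor
    · rw [PySem.List.pyGetD_natCast]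
      exact hrhs.2 _ (habs k hk)
    · rw [next_index _ _ (by positivity) (by exact_mod_cast hk)]
      split_ifs with hlt
      · have e3 : ((k : Int) + 1) = ((k + 1 : Nat) : Int) := by push_cast; ring
        rw [e3, PySem.List.pyGetD_natCast]
        exact hrhs.2 _ (habs (k + 1) (by exact_mod_cast hlt))
      · rw [PySem.List.pyGetD_zero]
        have hn0 : 0 < bs.length := by omega
        have : bs.getD 0 0 ∈ bs := habs 0 hn0
        simpa [List.getD] using hrhs.2 _ this
  · rw [foldl_max_proj_le_iff]
    have hlhs := (foldl_max2_le_iff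
      (fun i => |PySem.List.pyGetD bs i 0|)
      (fun i => |PySem.List.pyGetD bs (PySem.Int.mod (i + 1) (bs.length : Int)) 0|)
      (PySem.List.pyRange 0 (bs.length : Int) 1) m _).mp le_rfl
    refine ⟨hlhs.1, ?_⟩
    intro b hb
    obtain ⟨k, hk, hbk⟩ := List.getElem_of_mem hb
    have hmem : ((k : Int)) ∈ PySem.List.pyRange 0 (bs.length : Int) 1 := by
      rw [PySem.List.mem_pyRange_one]; exact ⟨by positivity, by exact_mod_cast hk⟩
    have := (hlhs.2 _ hmem).1
    rw [PySem.List.pyGetD_natCast, List.getD_eq_getElem bs 0 hk, hbk] at this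
    exact this

-- A's indexed dict loop = fold of insPair over the circular pair list
lemma aDict_pairs (bs : List Int) (e : PySem.Dict Int Int) :
    (PySem.List.pyRange 0 (bs.length : Int) 1).foldl (aDict bs) e
      = (pairSeq bs).foldl insPair e := by
  cases bs with
  | nil => simp [pairSeq, PySem.List.pyRange]
  | cons b t =>
    have hlen : ((pairSeq (b :: t)).length : Int) = ((b :: t).length : Int) := by
      simp [pairSeq, pairGo_length]
    have hcongr : ∀ (d : PySem.Dict Int Int), ∀ i ∈ PySem.List.pyRange 0 ((b :: t).length : Int) 1,
        aDict (b :: t) d i = insPair d (PySem.List.pyGetD (pairSeq (b :: t)) i (0, 0)) := by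
      intro d i hi
      rw [PySem.List.mem_pyRange_one] at hi
      obtain ⟨k, rfl⟩ : ∃ k : Nat, i = (k : Int) := ⟨i.toNat, (Int.toNat_of_nonneg hi.1).symm⟩
      have hk : k < (b :: t).length := by exact_mod_cast hi.2
      have hps : pairSeq (b :: t) = (b :: t).zip (t ++ [b]) := by
        simp [pairSeq, pairGo_zip]
      have hzlen : k < ((b :: t).zip (t ++ [b])).length := by
        simpa using hk
      have hget : PySem.List.pyGetD (pairSeq (b :: t)) (k : Int) (0, 0)
          = ((b :: t)[k]'hk, (t ++ [b])[k]'(by simpa using hk)) := by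
        rw [hps, PySem.List.pyGetD_natCast, List.getD_eq_getElem _ _ hzlen, List.getElem_zip]
      rw [hget]
      unfold aDict insPair
      rw [bTail_eq, bHead_eq]
      have hcurr : PySem.List.pyGetD (b :: t) (k : Int) 0 = (b :: t)[k]'hk := by
        rw [PySem.List.pyGetD_natCast, List.getD_eq_getElem _ _ hk]
      have hnext : PySem.List.pyGetD (b :: t)
          (PySem.Int.mod ((k : Int) + 1) ((b :: t).length : Int)) 0
            = (t ++ [b])[k]'(by simpa using hk) := by
        rw [next_index _ _ (by positivity) (by exact_mod_cast hk)]
        split_ifs with hlt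
        · have hk1 : k + 1 < (b :: t).length := by exact_mod_cast hlt
          have e3 : ((k : Int) + 1) = ((k + 1 : Nat) : Int) := by push_cast; ring
          rw [e3, PySem.List.pyGetD_natCast, List.getD_eq_getElem _ _ hk1]
          have hkt : k < t.length := by simpa using hk1
          rw [List.getElem_append_left hkt]
          simp
        · have hkt : k = t.length := by
            have : k + 1 = (b :: t).length := by omega
            simpa using this
          subst hkt
          rw [PySem.List.pyGetD_zero]
          rw [List.getElem_append_right (le_refl _)]
          simp [List.getD]
      rw [hcurr, hnext]
    rw [PySem.List.foldl_congr_mem _ _ _ e hcongr]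
    rw [hlen.symm]
    have := PySem.List.foldl_pyRange_pyGetD (pairSeq (b :: t)) (0, 0) insPair e (le_refl 0)
    simpa [PySem.List.len] using this

-- the closed chromosome: token fold + closure = A's range fold
lemma block_eq (bs : List Int) (e : PySem.Dict Int Int) (m : Int) :
    closeCore (bs.foldl emitBlock (e, none, none, m))
      = (PySem.List.pyRange 0 (bs.length : Int) 1).foldl (aStep bs) (e, m) := by
  have hsplit : (PySem.List.pyRange 0 (bs.length : Int) 1).foldl (aStep bs) (e, m)
      = ((PySem.List.pyRange 0 (bs.length : Int) 1).foldl (aDict bs) e,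
         (PySem.List.pyRange 0 (bs.length : Int) 1).foldl (aMax bs) m) := by
    have : aStep bs = fun st i => (aDict bs st.1 i, aMax bs st.2 i) := by
      funext st i; exact aStep_eq bs st i
    rw [this]
    exact PySem.List.foldl_prod_mk (aDict bs) (aMax bs) _ e m
  rw [hsplit, aDict_pairs, max_fold_eq]
  cases bs with
  | nil => rfl
  | cons b t =>
    have hfirst : emitBlock (e, none, none, m) b = (e, some b, some b, max m |b|) := rfl
    simp only [List.foldl_cons, hfirst, close_fold, pairSeq]

-- A's per-chunk action on (edges, max) for a raw chunk of characters
def chunkA (st : PySem.Dict Int Int × Int) (cs : List Char) : PySem.Dict Int Int × Int :=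
  let bs := (PySem.Chars.split₀ (cs.filter (fun c => c ≠ ')'))).map
    (fun t => (PySem.Int.ofChars? t).getD 0)
  (PySem.List.pyRange 0 (bs.length : Int) 1).foldl (aStep bs) st

-- scanning 'chunk ++ ['(']' from a fresh chromosome state performs chunkA
lemma bStep_paren (st : List Char × PySem.Dict Int Int × Option Int × Option Int × Int) :
    bStep st '(' = ([], (closeCore (bFlush st).2).1, none, none, (closeCore (bFlush st).2).2) := by
  unfold bStep
  rw [if_pos rfl]
  rcases bFlush st with ⟨tk, E, F, P, M⟩
  cases P <;> rfl

lemma scan_close (cs : List Char) (h : '(' ∉ cs) (e : PySem.Dict Int Int) (m : Int) :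
    (cs ++ ['(']).foldl bStep ([], e, none, none, m)
      = ([], (chunkA (e, m) cs).1, none, none, (chunkA (e, m) cs).2) := by
  have hsc := scan_chunk cs h [] (e, none, none, m)
  simp only [List.reverse_nil] at hsc
  rw [List.foldl_append, List.foldl_cons, List.foldl_nil, bStep_paren, hsc]
  have htoks : PySem.Chars.split₀.go (cs.filter (fun c => c ≠ ')')) [] []
      = PySem.Chars.split₀ (cs.filter (fun c => c ≠ ')')) := rfl
  rw [htoks]
  have hmap : ∀ (core : PySem.Dict Int Int × Option Int × Option Int × Int),
      (PySem.Chars.split₀ (cs.filter (fun c => c ≠ ')'))).foldl emitTok core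
        = ((PySem.Chars.split₀ (cs.filter (fun c => c ≠ ')'))).map
            (fun t => (PySem.Int.ofChars? t).getD 0)).foldl emitBlock core := by
    intro core
    rw [List.foldl_map]
    rfl
  rw [hmap]
  show ([], (closeCore _).1, none, none, (closeCore _).2) = _
  rw [block_eq]
  rfl

-- folding the scanner over a joined chunk list = folding chunkA over the chunks
lemma scan_chunks (chunks : List (List Char)) (h : ∀ ch ∈ chunks, '(' ∉ ch)
    (e : PySem.Dict Int Int) (m : Int) :
    (chunks.flatMap (· ++ ['('])).foldl bStep ([], e, none, none, m)
      = ([], (chunks.foldl chunkA (e, m)).1, none, none, (chunks.foldl chunkA (e, m)).2) := by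
  induction chunks generalizing e m with
  | nil => rfl
  | cons ch chs ih =>
    rw [List.flatMap_cons, List.foldl_append,
      scan_close ch (h ch (List.mem_cons_self ..)) e m,
      ih (fun c hc => h c (List.mem_cons_of_mem _ hc))]
    simp

-- A's string-level chunk body equals chunkA on the chunk's characters
lemma chunkA_str (st : PySem.Dict Int Int × Int) (chrom : String) :
    (if chrom = "" then st
     else
       let blocks := pvBlocks chrom
       (PySem.List.pyRange 0 (blocks.length : Int) 1).foldl (aStep blocks) st)
      = chunkA st chrom.toList := by
  by_cases hch : chrom = ""
  · subst hch
    rfl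
  · rw [if_neg hch]
    have hbs : pvBlocks chrom
        = (PySem.Chars.split₀ (chrom.toList.filter (fun c => c ≠ ')'))).map
            (fun t => (PySem.Int.ofChars? t).getD 0) := by
      have hX : (PySem.Str.replace chrom ")" "").toList
          = chrom.toList.filter (fun c => c ≠ ')') := by
        rw [PySem.Str.toList_replace]
        have h1 : (")" : String).toList = [')'] := rfl
        have h2 : ("" : String).toList = [] := rfl
        rw [h1, h2, replace_filter]
      unfold pvBlocks PySem.Str.split₀
      rw [hX, List.map_map]
      refine List.map_congr_left ?_
      intro t _
      simp [PySem.Int.ofStr?, String.toList_ofList]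
    rw [hbs]
    rfl

-- ===== VERDICT (by name: the statement is the Claim_ definition above) =====
theorem parse_genome_to_edges_spec : Claim_equal_parse_genome_to_edges := by
  intro s _ _
  unfold Spec_parse_genome_to_edges parse_genome_to_edges parse_genome_to_edges_alt
  have hchroms : pvChroms s
      = ((spGo (PySem.Chars.strip s.toList)).1 :: (spGo (PySem.Chars.strip s.toList)).2).map
          String.ofList := by
    unfold pvChroms PySem.Str.split? PySem.Chars.split?
    have h1 : ("(" : String).toList = ['('] := rfl
    rw [PySem.Str.toList_strip, h1]
    rw [if_neg (by simp)]
    simp [chunks_eq]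
  have hA : (pvChroms s).foldl
      (fun st chrom =>
        if chrom = "" then st
        else
          let blocks := pvBlocks chrom
          (PySem.List.pyRange 0 (blocks.length : Int) 1).foldl (aStep blocks) st)
      (PySem.Dict.empty, 0)
      = ((spGo (PySem.Chars.strip s.toList)).1 :: (spGo (PySem.Chars.strip s.toList)).2).foldl
          chunkA (PySem.Dict.empty, 0) := by
    rw [hchroms, List.foldl_map]
    refine PySem.List.foldl_congr_mem _ _ _ _ ?_
    intro st ch _
    rw [chunkA_str st (String.ofList ch), String.toList_ofList]
  have hB : (PySem.Str.strip s).toList ++ ['(']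
      = ((spGo (PySem.Chars.strip s.toList)).1 :: (spGo (PySem.Chars.strip s.toList)).2).flatMap
          (· ++ ['(']) := by
    rw [PySem.Str.toList_strip, spGo_join]
  have hpar : ∀ ch ∈ (spGo (PySem.Chars.strip s.toList)).1 :: (spGo (PySem.Chars.strip s.toList)).2,
      '(' ∉ ch := by
    intro ch hch
    rcases List.mem_cons.mp hch with rfl | hm
    · exact (spGo_no_paren _).1
    · exact (spGo_no_paren _).2 ch hm
  rw [hB, scan_chunks _ hpar, hA]
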